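-- pv_equiv track=rewrite | github.com/jaschadub/VectorSmuggle | steganography/fragmentation.py | _fragment_text
-- ===== SOURCE A (Python) =====
-- def _fragment_text(text: str, num_fragments: int) -> list[str]:
--     """Fragment text into specified number of pieces."""
--     if num_fragments <= 1:
--         return [text]
--
--     # Calculate fragment size
--     text_length = len(text)
--     base_size = text_length // num_fragments
--     remainder = text_length % num_fragments
--
--     fragments = []
--     start = 0
--
--     for i in range(num_fragments):
--         # Add extra character to first 'remainder' fragments
--         fragment_size = base_size + (1 if i < remainder else 0)
--         end = start + fragment_size
--
--         fragments.append(text[start:end])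
--         start = end
--
--     return fragments
-- ===== SOURCE B (Python) =====
-- def _fragment_text(text: str, num_fragments: int) -> list[str]:
--     """Fragment text into specified number of pieces."""
--     if num_fragments <= 1:
--         return [text]
--     base, rem = divmod(len(text), num_fragments)
--     return [text[i * base + min(i, rem):(i + 1) * base + min(i + 1, rem)]
--             for i in range(num_fragments)]
-- ===== Notes on version B (the rewrite author's own statement) =====
-- stated objective: simpler
-- what changed: Replaces the loop that maintains a running start/end accumulator and appends to a list with a single comprehension in which each fragment's boundaries are given by the closed formula i*base + min(i, rem).
import Mathlib
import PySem

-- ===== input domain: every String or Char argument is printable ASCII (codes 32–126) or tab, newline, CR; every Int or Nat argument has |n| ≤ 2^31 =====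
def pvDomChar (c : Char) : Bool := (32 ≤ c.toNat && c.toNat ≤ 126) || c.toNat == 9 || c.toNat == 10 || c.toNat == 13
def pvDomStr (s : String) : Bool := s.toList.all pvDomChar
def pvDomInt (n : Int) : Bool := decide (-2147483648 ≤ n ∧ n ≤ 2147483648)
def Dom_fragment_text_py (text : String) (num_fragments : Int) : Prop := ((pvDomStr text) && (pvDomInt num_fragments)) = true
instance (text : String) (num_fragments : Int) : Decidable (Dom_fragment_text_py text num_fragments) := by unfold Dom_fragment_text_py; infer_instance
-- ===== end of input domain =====

-- B replaces A's running start/end accumulator loop by one comprehension with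
-- closed-form fragment boundaries i*base + min(i, rem); objective: simpler.

-- ===== PORT A =====
def fragment_text_py (text : String) (num_fragments : Int) : List String :=
  if num_fragments ≤ 1 then [text]
  else
    let text_length : Int := PySem.Str.len text
    let base_size : Int := PySem.Int.floordiv text_length num_fragments
    let remainder : Int := PySem.Int.mod text_length num_fragments
    ((PySem.List.pyRange 0 num_fragments 1).foldl
      (fun (st : List String × Int) (i : Int) =>
        let fragment_size : Int := base_size + (if i < remainder then 1 else 0)
        let e : Int := st.2 + fragment_size
        (st.1 ++ [PySem.Str.slice text (some st.2) (some e)], e))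
      ([], 0)).1

-- ===== PORT B =====
def fragment_text_py_alt (text : String) (num_fragments : Int) : List String :=
  if num_fragments ≤ 1 then [text]
  else
    let base : Int := PySem.Int.floordiv (PySem.Str.len text) num_fragments
    let rem : Int := PySem.Int.mod (PySem.Str.len text) num_fragments
    (PySem.List.pyRange 0 num_fragments 1).map
      (fun (i : Int) =>
        PySem.Str.slice text (some (i * base + min i rem))
          (some ((i + 1) * base + min (i + 1) rem)))

-- ===== PRECONDITION & SPEC =====
def Spec_fragment_text_py (text : String) (num_fragments : Int) (out : List String) : Prop := out = fragment_text_py_alt text num_fragments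
instance (text : String) (num_fragments : Int) (out : List String) : Decidable (Spec_fragment_text_py text num_fragments out) := by unfold Spec_fragment_text_py; infer_instance

-- ===== CLAIM (what is proved, stated in full; the proofs are below) =====
def Claim_equal_fragment_text_py : Prop := ∀ (text : String) (num_fragments : Int), Dom_fragment_text_py text num_fragments → Spec_fragment_text_py text num_fragments (fragment_text_py text num_fragments)

-- ===== LEMMAS AND PROOFS =====

-- Loop invariant: after m steps A's accumulator pair equals (the first m fragments
-- by B's closed-form boundaries, the closed-form boundary m*base + min m rem).
theorem frag_loop (text : String) (base rem : Int) (hrem : 0 ≤ rem) (m : ℕ) :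
    ((List.range m).foldl
      (fun (st : List String × Int) (k : ℕ) =>
        (st.1 ++ [PySem.Str.slice text (some st.2)
            (some (st.2 + (base + (if (k : Int) < rem then 1 else 0))))],
         st.2 + (base + (if (k : Int) < rem then 1 else 0))))
      ([], 0))
    = ((List.range m).map (fun (k : ℕ) =>
        PySem.Str.slice text (some ((k : Int) * base + min (k : Int) rem))
          (some (((k : Int) + 1) * base + min ((k : Int) + 1) rem))),
       (m : Int) * base + min (m : Int) rem) := by
  induction m with
  | zero => simp [min_eq_left hrem]
  | succ m ih =>
      rw [List.range_succ, List.foldl_append, List.map_append, ih]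
      simp only [List.foldl_cons, List.foldl_nil, List.map_cons, List.map_nil]
      have h1 : ((m : Int) * base + min (m : Int) rem) +
          (base + (if (m : Int) < rem then 1 else 0))
          = ((m : Int) + 1) * base + min ((m : Int) + 1) rem := by
        by_cases h : (m : Int) < rem
        · rw [if_pos h, min_eq_left (by omega : (m : Int) ≤ rem),
            min_eq_left (by omega : (m : Int) + 1 ≤ rem)]
          ring
        · rw [if_neg h, min_eq_right (by omega : rem ≤ (m : Int)),
            min_eq_right (by omega : rem ≤ (m : Int) + 1)]
          ring
      rw [Prod.mk.injEq]
      refine ⟨by rw [h1], by push_cast; rw [h1]⟩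

-- ===== VERDICT (by name: the statement is the Claim_ definition above) =====
theorem fragment_text_py_spec : Claim_equal_fragment_text_py := by
  intro text n _
  unfold Spec_fragment_text_py fragment_text_py fragment_text_py_alt
  by_cases h : n ≤ 1
  · simp [h]
  · simp only [h, if_false]
    have hn : (0:Int) < n := by omega
    have hrem : 0 ≤ PySem.Int.mod (PySem.Str.len text) n := by
      rw [PySem.Int.mod_eq_emod_of_pos hn]
      exact Int.emod_nonneg _ (by omega)
    rw [PySem.List.pyRange_one]
    simp only [List.foldl_map, List.map_map, Int.sub_zero, zero_add, Function.comp_def]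
    rw [frag_loop text _ _ hrem]
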